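-- pv_equiv track=rewrite | github.com/jacey-h/Programming-language | Programmers_school/Level1/최소직사각형.py | solution
-- ===== SOURCE A (Python) =====
-- def solution(sizes):
--     w = 0
--     h = 0
--     for first, second in sizes:
--         if first < second:
--             first, second = second, first
--         w = max(w, first)
--         h = max(h, second)
--     return w*h
-- ===== SOURCE B (Python) =====
-- def solution(sizes):
--     longs = sorted([0] + [b if a < b else a for a, b in sizes])
--     shorts = sorted([0] + [a if a < b else b for a, b in sizes])
--     return longs[-1] * shorts[-1]
-- ===== Notes on version B (the rewrite author's own statement) =====
-- stated objective: alternative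
-- what changed: Replaces A's single stateful running-max loop (with in-place pair swapping) by building the two normalized side lists seeded with 0, sorting each, and multiplying their last (largest) elements.
import Mathlib
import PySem

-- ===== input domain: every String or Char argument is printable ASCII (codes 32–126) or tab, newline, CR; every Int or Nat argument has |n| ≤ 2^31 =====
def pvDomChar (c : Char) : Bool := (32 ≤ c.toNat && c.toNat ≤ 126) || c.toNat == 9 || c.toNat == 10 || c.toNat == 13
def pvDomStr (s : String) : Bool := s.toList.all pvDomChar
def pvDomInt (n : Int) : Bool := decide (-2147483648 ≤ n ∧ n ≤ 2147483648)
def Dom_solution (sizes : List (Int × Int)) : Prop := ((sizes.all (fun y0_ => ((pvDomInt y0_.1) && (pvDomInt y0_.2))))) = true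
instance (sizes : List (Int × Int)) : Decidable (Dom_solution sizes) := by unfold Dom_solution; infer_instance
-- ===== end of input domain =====

-- B replaces A's single stateful running-max loop by sorting the 0-seeded normalized side lists and multiplying their last elements; objective: alternative.

-- ===== PORT A =====
-- literal port of A: one loop carrying (w, h), swapping the pair so that first ≥ second
def solution (sizes : List (Int × Int)) : Int :=
  let s := sizes.foldl (fun (acc : Int × Int) (p : Int × Int) =>
    let first := p.1
    let second := p.2
    let (first, second) := if first < second then (second, first) else (first, second)
    (max acc.1 first, max acc.2 second)) (0, 0)
  s.1 * s.2

-- ===== PORT B =====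
-- port of B: sort [0] ++ long sides and [0] ++ short sides; longs[-1] * shorts[-1]
-- (both sorted lists are nonempty, so the [-1] indexing always succeeds; .getD 0 is never the default)
def solution_alt (sizes : List (Int × Int)) : Int :=
  let longs := PySem.List.sorted ([0] ++ sizes.map (fun p => if p.1 < p.2 then p.2 else p.1)) (fun x => x) false
  let shorts := PySem.List.sorted ([0] ++ sizes.map (fun p => if p.1 < p.2 then p.1 else p.2)) (fun x => x) false
  (PySem.List.pyGet? longs (-1)).getD 0 * (PySem.List.pyGet? shorts (-1)).getD 0

-- ===== PRECONDITION & SPEC =====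
def Spec_solution (sizes : List (Int × Int)) (out : Int) : Prop := out = solution_alt sizes
instance (sizes : List (Int × Int)) (out : Int) : Decidable (Spec_solution sizes out) := by unfold Spec_solution; infer_instance

-- ===== CLAIM =====
def Claim_equal_solution : Prop := ∀ (sizes : List (Int × Int)), Dom_solution sizes → Spec_solution sizes (solution sizes)

-- ===== LEMMAS AND PROOFS =====

-- A's combined fold splits into componentwise max-folds over max/min of each pair
theorem solution_fold_split (sizes : List (Int × Int)) (w h : Int) :
    sizes.foldl (fun (acc : Int × Int) (p : Int × Int) =>
      let first := p.1
      let second := p.2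
      let (first, second) := if first < second then (second, first) else (first, second)
      (max acc.1 first, max acc.2 second)) (w, h)
    = ((sizes.map (fun p => if p.1 < p.2 then p.2 else p.1)).foldl max w,
       (sizes.map (fun p => if p.1 < p.2 then p.1 else p.2)).foldl max h) := by
  induction sizes generalizing w h with
  | nil => rfl
  | cons p rest ih =>
    simp only [List.foldl_cons, List.map_cons]
    rcases p with ⟨a, b⟩
    by_cases hab : a < b
    · simp only [hab, if_pos]; rw [ih]
    · simp only [hab, if_neg, not_false_iff]; rw [ih]

-- foldl max a l is a member of a :: l
theorem foldl_max_mem (a : Int) (l : List Int) : l.foldl max a ∈ a :: l := by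
  induction l generalizing a with
  | nil => simp
  | cons x xs ih =>
    simp only [List.foldl_cons]
    have h := ih (max a x)
    rw [List.mem_cons] at h
    rcases h with h | h
    · rcases max_choice a x with hm | hm
      · exact List.mem_cons.mpr (Or.inl (h.trans hm))
      · exact List.mem_cons.mpr (Or.inr (List.mem_cons.mpr (Or.inl (h.trans hm))))
    · exact List.mem_cons.mpr (Or.inr (List.mem_cons.mpr (Or.inr h)))

-- foldl max a l is an upper bound of a :: l
theorem foldl_max_ub (a : Int) (l : List Int) : ∀ x ∈ a :: l, x ≤ l.foldl max a := by
  induction l generalizing a with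
  | nil => simp
  | cons y ys ih =>
    intro x hx
    simp only [List.mem_cons] at hx
    rcases hx with rfl | rfl | hx
    · exact le_trans (le_max_left x y) (ih _ _ (by simp))
    · exact le_trans (le_max_right a x) (ih _ _ (by simp))
    · exact ih _ x (by simp [hx])

-- the last element (getLast?) of a list is a member
theorem getLast?_mem_int (s : List Int) (m : Int) (h : s.getLast? = some m) : m ∈ s := by
  induction s with
  | nil => simp at h
  | cons a t ih =>
    cases t with
    | nil => simp_all
    | cons b u =>
      rw [List.getLast?_cons_cons] at h
      exact List.mem_cons_of_mem _ (ih h)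

-- in a ≤-sorted list, the last element is an upper bound
theorem pairwise_le_getLast :
    ∀ (s : List Int) (m : Int), s.Pairwise (fun a b : Int => a ≤ b) →
      s.getLast? = some m → ∀ x ∈ s, x ≤ m := by
  intro s
  induction s with
  | nil => intro m _ h; simp at h
  | cons a t ih =>
    intro m hp h x hx
    cases t with
    | nil =>
      simp only [List.getLast?_singleton, Option.some.injEq] at h
      simp only [List.mem_singleton] at hx
      omega
    | cons b u =>
      rw [List.getLast?_cons_cons] at h
      rcases List.mem_cons.mp hx with rfl | hx'
      · exact (List.pairwise_cons.mp hp).1 m (getLast?_mem_int _ _ h)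
      · exact ih m (List.pairwise_cons.mp hp).2 h x hx'

-- the last element of sorted(0 :: l) equals A's running max fold
theorem getLast?_sorted_zero_cons (l : List Int) :
    (PySem.List.sorted (0 :: l) (fun x => x) false).getLast? = some (l.foldl max 0) := by
  set s := PySem.List.sorted (0 :: l) (fun x => x) false with hs
  have hperm : s.Perm (0 :: l) := PySem.List.sorted_perm _ _ _
  have hne : s ≠ [] := by
    intro h; have := hperm.length_eq; simp [h] at this
  have hpair : s.Pairwise (fun a b : Int => a ≤ b) := by
    simpa using PySem.List.sorted_pairwise (xs := 0 :: l) (key := fun x : Int => x)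
  cases hsl : s.getLast? with
  | none => exact absurd (List.getLast?_eq_none_iff.mp hsl) hne
  | some m =>
    congr 1
    have hmmem : m ∈ 0 :: l := hperm.mem_iff.mp (getLast?_mem_int s m hsl)
    have hmub : ∀ x ∈ 0 :: l, x ≤ m := fun x hx =>
      pairwise_le_getLast s m hpair hsl x (hperm.mem_iff.mpr hx)
    have h1 : l.foldl max 0 ≤ m := hmub _ (foldl_max_mem 0 l)
    have h2 : m ≤ l.foldl max 0 := foldl_max_ub 0 l m hmmem
    omega

-- ===== VERDICT =====
theorem solution_spec : Claim_equal_solution := by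
  intro sizes _
  unfold Spec_solution solution solution_alt
  simp only [solution_fold_split, List.singleton_append,
    PySem.List.pyGet?_neg_one, getLast?_sorted_zero_cons, Option.getD_some]
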